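-- pv_equiv track=rewrite | github.com/mjoh223/phamlite | ISLAND_runner.py | list_and_list_of_pairs
-- ===== SOURCE A (Python) =====
-- def list_and_list_of_pairs(input_list, list_of_pairs, threshold):
--
--     input_list = sorted(input_list)
--
--     if len(list_of_pairs) == 0:
--
--         return []
--
--     if isinstance(list_of_pairs[0], int):
--
--         list_of_pairs = [[pair] for pair in list_of_pairs]
--
--     new_pairs = []
--
--     for pair in list_of_pairs:
--
--         for number in input_list:
--
--             if all([abs(number - value) <= threshold for value in pair]) and number not in pair:
--
--                 new_pairs.append(pair + [number])
--
--             elif number - min(pair) > threshold: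
--
--                 break
--
--     return new_pairs
-- ===== SOURCE B (Python) =====
-- def _bisect_left(a, x):
--     lo, hi = 0, len(a)
--     while lo < hi:
--         mid = (lo + hi) // 2
--         if a[mid] < x:
--             lo = mid + 1
--         else:
--             hi = mid
--     return lo
--
--
-- def _bisect_right(a, x):
--     lo, hi = 0, len(a)
--     while lo < hi:
--         mid = (lo + hi) // 2
--         if x < a[mid]:
--             hi = mid
--         else:
--             lo = mid + 1
--     return lo
--
--
-- def list_and_list_of_pairs(input_list, list_of_pairs, threshold):
--     lst = sorted(input_list)
--     new_pairs = []
--     for pair in list_of_pairs: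
--         if pair:
--             lo = _bisect_left(lst, max(pair) - threshold)
--             hi = _bisect_right(lst, min(pair) + threshold)
--         else:
--             lo, hi = 0, len(lst)
--         for number in lst[lo:hi]:
--             if number not in pair:
--                 new_pairs.append(pair + [number])
--     return new_pairs
-- ===== Notes on version B (the rewrite author's own statement) =====
-- stated objective: faster
-- what changed: Instead of scanning the whole sorted list per pair and testing every element against every pair member (with a break on overshoot), B binary-searches the sorted list for the valid window [max(pair)-threshold, min(pair)+threshold] and iterates only that slice, checking membership only there.
import Mathlib
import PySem

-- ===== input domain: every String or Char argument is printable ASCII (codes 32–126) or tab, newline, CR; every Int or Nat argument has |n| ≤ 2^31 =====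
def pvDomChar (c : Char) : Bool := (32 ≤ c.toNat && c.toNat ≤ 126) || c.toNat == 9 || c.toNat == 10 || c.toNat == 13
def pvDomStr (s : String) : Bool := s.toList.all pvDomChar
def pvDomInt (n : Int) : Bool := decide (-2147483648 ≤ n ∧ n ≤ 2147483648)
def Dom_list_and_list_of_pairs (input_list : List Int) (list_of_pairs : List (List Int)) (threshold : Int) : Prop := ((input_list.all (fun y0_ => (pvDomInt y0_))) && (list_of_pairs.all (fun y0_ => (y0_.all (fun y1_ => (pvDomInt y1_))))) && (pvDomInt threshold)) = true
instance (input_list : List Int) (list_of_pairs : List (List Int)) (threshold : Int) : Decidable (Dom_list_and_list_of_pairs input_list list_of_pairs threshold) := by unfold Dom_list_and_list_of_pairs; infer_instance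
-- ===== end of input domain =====

-- B replaces A's full scan of the sorted list per pair by a hand-rolled binary search for the
-- window [max(pair)-threshold, min(pair)+threshold] and iterates only that slice (objective: faster).


-- ===== PORT A =====
-- A's inner 'for number in input_list:' loop: append pair+[number] when every pair member is
-- within threshold and number is not in pair; break (return acc as it stands) when
-- number - min(pair) > threshold.  Python's min() on an empty pair is unreachable (for an empty
-- pair the first branch always fires); '(min? …).getD 0' stands for that unreachable call.
def pvAInner (pair : List Int) (threshold : Int) : List Int → List (List Int) → List (List Int)
  | [], acc => acc
  | n :: rest, acc =>
    if (∀ v ∈ pair, |n - v| ≤ threshold) ∧ n ∉ pair then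
      pvAInner pair threshold rest (acc ++ [pair ++ [n]])
    else if n - ((PySem.List.min? pair (fun v => v)).getD 0) > threshold then
      acc
    else
      pvAInner pair threshold rest acc

-- The 'isinstance(list_of_pairs[0], int)' re-wrapping branch of A is statically impossible at
-- the declared type List (List Int) and is therefore dropped.
def list_and_list_of_pairs (input_list : List Int) (list_of_pairs : List (List Int)) (threshold : Int) : List (List Int) :=
  let lst := PySem.List.sorted input_list (fun x => x) false
  if list_of_pairs.length = 0 then []
  else list_of_pairs.foldl (fun acc pair => pvAInner pair threshold lst acc) []

-- ===== PORT B =====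
-- hand-written _bisect_left of Source B ('mid = (lo+hi)//2' inlined); the fuel argument is only a
-- totality device: hi - lo strictly shrinks each iteration, so fuel = hi - lo never runs out
def pvBLGo (xs : List Int) (x : Int) : Nat → Nat → Nat → Nat
  | 0, lo, _hi => lo
  | fuel + 1, lo, hi =>
    if lo < hi then
      if xs.getD ((lo + hi) / 2) 0 < x then pvBLGo xs x fuel ((lo + hi) / 2 + 1) hi
      else pvBLGo xs x fuel lo ((lo + hi) / 2)
    else lo

def pvBL (xs : List Int) (x : Int) (lo hi : Nat) : Nat := pvBLGo xs x (hi - lo) lo hi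

-- hand-written _bisect_right of Source B (same fuel device)
def pvBRGo (xs : List Int) (x : Int) : Nat → Nat → Nat → Nat
  | 0, lo, _hi => lo
  | fuel + 1, lo, hi =>
    if lo < hi then
      if x < xs.getD ((lo + hi) / 2) 0 then pvBRGo xs x fuel lo ((lo + hi) / 2)
      else pvBRGo xs x fuel ((lo + hi) / 2 + 1) hi
    else lo

def pvBR (xs : List Int) (x : Int) (lo hi : Nat) : Nat := pvBRGo xs x (hi - lo) lo hi

-- the 'if pair: lo = …; hi = … else: lo, hi = 0, len(lst)' window computation of Source B
def pvWindow (lst : List Int) (pair : List Int) (threshold : Int) : Nat × Nat :=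
  if pair ≠ [] then
    (pvBL lst (((PySem.List.max? pair (fun v => v)).getD 0) - threshold) 0 lst.length,
     pvBR lst (((PySem.List.min? pair (fun v => v)).getD 0) + threshold) 0 lst.length)
  else (0, lst.length)

def list_and_list_of_pairs_alt (input_list : List Int) (list_of_pairs : List (List Int)) (threshold : Int) : List (List Int) :=
  let lst := PySem.List.sorted input_list (fun x => x) false
  list_of_pairs.foldl (fun acc pair =>
    (PySem.List.slice lst (some ((pvWindow lst pair threshold).1 : Int))
        (some ((pvWindow lst pair threshold).2 : Int))).foldl
      (fun acc n => if n ∉ pair then acc ++ [pair ++ [n]] else acc) acc) []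

-- ===== PRECONDITION & SPEC =====
def Spec_list_and_list_of_pairs (input_list : List Int) (list_of_pairs : List (List Int)) (threshold : Int) (out : List (List Int)) : Prop := out = list_and_list_of_pairs_alt input_list list_of_pairs threshold
instance (input_list : List Int) (list_of_pairs : List (List Int)) (threshold : Int) (out : List (List Int)) : Decidable (Spec_list_and_list_of_pairs input_list list_of_pairs threshold out) := by unfold Spec_list_and_list_of_pairs; infer_instance

-- ===== CLAIM (what is proved, stated in full; the proofs are below) =====
def Claim_equal_list_and_list_of_pairs : Prop := ∀ (input_list : List Int) (list_of_pairs : List (List Int)) (threshold : Int), Dom_list_and_list_of_pairs input_list list_of_pairs threshold → Spec_list_and_list_of_pairs input_list list_of_pairs threshold (list_and_list_of_pairs input_list list_of_pairs threshold)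

-- ===== LEMMAS AND PROOFS =====

-- the common canonical per-pair result: the in-window, not-already-in-pair elements in sorted order
def pvCanon (pair : List Int) (threshold : Int) (lst : List Int) : List (List Int) :=
  (lst.filter (fun n => decide ((∀ v ∈ pair, |n - v| ≤ threshold) ∧ n ∉ pair))).map (fun n => pair ++ [n])

lemma pvFoldlCongr {α β : Type} (f g : β → α → β) (l : List α) (acc : β)
    (h : ∀ a, ∀ x ∈ l, f a x = g a x) : l.foldl f acc = l.foldl g acc := by
  induction l generalizing acc with
  | nil => rfl
  | cons x xs ih =>
    simp only [List.foldl_cons]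
    rw [h acc x (by simp)]
    exact ih _ (fun a y hy => h a y (by simp [hy]))

lemma pvAInner_eq_canon (pair : List Int) (threshold : Int) (lst : List Int)
    (hs : List.Pairwise (fun a b => a ≤ b) lst) (acc : List (List Int)) :
    pvAInner pair threshold lst acc = acc ++ pvCanon pair threshold lst := by
  induction lst generalizing acc with
  | nil => simp [pvAInner, pvCanon]
  | cons n rest ih =>
    obtain ⟨hhead, htail⟩ := List.pairwise_cons.mp hs
    by_cases h1 : (∀ v ∈ pair, |n - v| ≤ threshold) ∧ n ∉ pair
    · rw [pvAInner, if_pos h1, ih htail]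
      unfold pvCanon
      rw [List.filter_cons_of_pos (by simpa using h1)]
      simp
    · rw [pvAInner, if_neg h1]
      by_cases h2 : n - ((PySem.List.min? pair (fun v => v)).getD 0) > threshold
      · rw [if_pos h2]
        have hne : pair ≠ [] := by
          rintro rfl
          exact h1 ⟨by simp, by simp⟩
        obtain ⟨m0, hm0⟩ : ∃ m0, PySem.List.min? pair (fun v => v) = some m0 := by
          cases h : PySem.List.min? pair (fun v => v) with
          | none => exact absurd ((PySem.List.min?_eq_none_iff pair _).mp h) hne
          | some m => exact ⟨m, rfl⟩
        have hm0mem := PySem.List.min?_mem hm0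
        rw [hm0, Option.getD_some] at h2
        unfold pvCanon
        rw [List.filter_cons_of_neg (by simpa using h1)]
        have hrest : rest.filter (fun m => decide ((∀ v ∈ pair, |m - v| ≤ threshold) ∧ m ∉ pair)) = [] := by
          rw [List.filter_eq_nil_iff]
          intro m hm
          simp only [decide_eq_true_eq, not_and]
          intro hall
          have h3 := abs_le.mp (hall m0 hm0mem)
          have h4 := hhead m hm
          omega
        rw [hrest]
        simp
      · rw [if_neg h2, ih htail]
        unfold pvCanon
        rw [List.filter_cons_of_neg (by simpa using h1)]

lemma pvBLGo_spec (xs : List Int) (x : Int) (hs : List.Pairwise (fun a b => a ≤ b) xs)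
    (fuel : Nat) : ∀ (lo hi : Nat), hi - lo ≤ fuel → hi ≤ xs.length → lo ≤ hi →
    (∀ j (hj : j < xs.length), j < lo → xs[j] < x) →
    (∀ j (hj : j < xs.length), hi ≤ j → x ≤ xs[j]) →
    lo ≤ pvBLGo xs x fuel lo hi ∧ pvBLGo xs x fuel lo hi ≤ hi ∧
    (∀ j (hj : j < xs.length), j < pvBLGo xs x fuel lo hi → xs[j] < x) ∧
    (∀ j (hj : j < xs.length), pvBLGo xs x fuel lo hi ≤ j → x ≤ xs[j]) := by
  have hmono : ∀ i j (hi' : i < xs.length) (hj : j < xs.length), i ≤ j → xs[i] ≤ xs[j] := by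
    intro i j hi' hj hij
    rcases Nat.lt_or_eq_of_le hij with h | h
    · exact List.pairwise_iff_getElem.mp hs i j hi' hj h
    · subst h; exact le_refl _
  induction fuel with
  | zero =>
    intro lo hi hfuel hhi hlo hb ha
    simp only [pvBLGo]
    exact ⟨le_refl _, hlo, fun j hj hjl => hb j hj hjl, fun j hj hjl => ha j hj (by omega)⟩
  | succ fuel ih =>
    intro lo hi hfuel hhi hlo hb ha
    simp only [pvBLGo]
    by_cases h : lo < hi
    · rw [if_pos h]
      have hmlen : (lo + hi) / 2 < xs.length := by omega
      rw [List.getD_eq_getElem xs 0 hmlen]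
      by_cases hc : xs[(lo + hi) / 2] < x
      · rw [if_pos hc]
        have hrec := ih ((lo + hi) / 2 + 1) hi (by omega) hhi (by omega)
          (fun j hj hjm => by
            rcases Nat.lt_succ_iff_lt_or_eq.mp hjm with h' | h'
            · exact lt_of_le_of_lt (hmono j ((lo + hi) / 2) hj hmlen (le_of_lt h')) hc
            · subst h'; exact hc) ha
        exact ⟨by omega, hrec.2.1, hrec.2.2.1, hrec.2.2.2⟩
      · rw [if_neg hc]
        have hxm : x ≤ xs[(lo + hi) / 2] := le_of_not_gt hc
        have hrec := ih lo ((lo + hi) / 2) (by omega) (by omega) (by omega) hb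
          (fun j hj hjm => le_trans hxm (hmono ((lo + hi) / 2) j hmlen hj hjm))
        exact ⟨hrec.1, by omega, hrec.2.2.1, hrec.2.2.2⟩
    · rw [if_neg h]
      exact ⟨le_refl _, hlo, fun j hj hjl => hb j hj hjl, fun j hj hjl => ha j hj (by omega)⟩

lemma pvBL_spec (xs : List Int) (x : Int) (hs : List.Pairwise (fun a b => a ≤ b) xs) (lo hi : Nat)
    (hhi : hi ≤ xs.length) (hlo : lo ≤ hi)
    (hb : ∀ j (hj : j < xs.length), j < lo → xs[j] < x)
    (ha : ∀ j (hj : j < xs.length), hi ≤ j → x ≤ xs[j]) :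
    lo ≤ pvBL xs x lo hi ∧ pvBL xs x lo hi ≤ hi ∧
    (∀ j (hj : j < xs.length), j < pvBL xs x lo hi → xs[j] < x) ∧
    (∀ j (hj : j < xs.length), pvBL xs x lo hi ≤ j → x ≤ xs[j]) :=
  pvBLGo_spec xs x hs (hi - lo) lo hi (le_refl _) hhi hlo hb ha

lemma pvBRGo_spec (xs : List Int) (x : Int) (hs : List.Pairwise (fun a b => a ≤ b) xs)
    (fuel : Nat) : ∀ (lo hi : Nat), hi - lo ≤ fuel → hi ≤ xs.length → lo ≤ hi →
    (∀ j (hj : j < xs.length), j < lo → xs[j] ≤ x) →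
    (∀ j (hj : j < xs.length), hi ≤ j → x < xs[j]) →
    lo ≤ pvBRGo xs x fuel lo hi ∧ pvBRGo xs x fuel lo hi ≤ hi ∧
    (∀ j (hj : j < xs.length), j < pvBRGo xs x fuel lo hi → xs[j] ≤ x) ∧
    (∀ j (hj : j < xs.length), pvBRGo xs x fuel lo hi ≤ j → x < xs[j]) := by
  have hmono : ∀ i j (hi' : i < xs.length) (hj : j < xs.length), i ≤ j → xs[i] ≤ xs[j] := by
    intro i j hi' hj hij
    rcases Nat.lt_or_eq_of_le hij with h | h
    · exact List.pairwise_iff_getElem.mp hs i j hi' hj h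
    · subst h; exact le_refl _
  induction fuel with
  | zero =>
    intro lo hi hfuel hhi hlo hb ha
    simp only [pvBRGo]
    exact ⟨le_refl _, hlo, fun j hj hjl => hb j hj hjl, fun j hj hjl => ha j hj (by omega)⟩
  | succ fuel ih =>
    intro lo hi hfuel hhi hlo hb ha
    simp only [pvBRGo]
    by_cases h : lo < hi
    · rw [if_pos h]
      have hmlen : (lo + hi) / 2 < xs.length := by omega
      rw [List.getD_eq_getElem xs 0 hmlen]
      by_cases hc : x < xs[(lo + hi) / 2]
      · rw [if_pos hc]
        have hrec := ih lo ((lo + hi) / 2) (by omega) (by omega) (by omega) hb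
          (fun j hj hjm => lt_of_lt_of_le hc (hmono ((lo + hi) / 2) j hmlen hj hjm))
        exact ⟨hrec.1, by omega, hrec.2.2.1, hrec.2.2.2⟩
      · rw [if_neg hc]
        have hxm : xs[(lo + hi) / 2] ≤ x := le_of_not_gt hc
        have hrec := ih ((lo + hi) / 2 + 1) hi (by omega) hhi (by omega)
          (fun j hj hjm => by
            rcases Nat.lt_succ_iff_lt_or_eq.mp hjm with h' | h'
            · exact le_trans (hmono j ((lo + hi) / 2) hj hmlen (le_of_lt h')) hxm
            · subst h'; exact hxm) ha
        exact ⟨by omega, hrec.2.1, hrec.2.2.1, hrec.2.2.2⟩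
    · rw [if_neg h]
      exact ⟨le_refl _, hlo, fun j hj hjl => hb j hj hjl, fun j hj hjl => ha j hj (by omega)⟩

lemma pvBR_spec (xs : List Int) (x : Int) (hs : List.Pairwise (fun a b => a ≤ b) xs) (lo hi : Nat)
    (hhi : hi ≤ xs.length) (hlo : lo ≤ hi)
    (hb : ∀ j (hj : j < xs.length), j < lo → xs[j] ≤ x)
    (ha : ∀ j (hj : j < xs.length), hi ≤ j → x < xs[j]) :
    lo ≤ pvBR xs x lo hi ∧ pvBR xs x lo hi ≤ hi ∧
    (∀ j (hj : j < xs.length), j < pvBR xs x lo hi → xs[j] ≤ x) ∧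
    (∀ j (hj : j < xs.length), pvBR xs x lo hi ≤ j → x < xs[j]) :=
  pvBRGo_spec xs x hs (hi - lo) lo hi (le_refl _) hhi hlo hb ha

-- a slice whose boundaries separate the elements satisfying 'a ≤ n ≤ b' is that filter
lemma pvSeg (xs : List Int) (a b : Int) (l r : Nat)
    (hl1 : ∀ j (hj : j < xs.length), j < l → xs[j] < a)
    (hl2 : ∀ j (hj : j < xs.length), l ≤ j → a ≤ xs[j])
    (hr1 : ∀ j (hj : j < xs.length), j < r → xs[j] ≤ b)
    (hr2 : ∀ j (hj : j < xs.length), r ≤ j → b < xs[j]) :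
    (xs.drop l).take (r - l) = xs.filter (fun n => decide (a ≤ n ∧ n ≤ b)) := by
  induction xs generalizing l r with
  | nil => simp
  | cons y ys ih =>
    cases l with
    | zero =>
      have hy : a ≤ y := hl2 0 (by simp) (Nat.zero_le 0)
      cases r with
      | zero =>
        simp only [Nat.sub_self, List.take_zero]
        symm
        rw [List.filter_eq_nil_iff]
        intro n hn
        rw [List.mem_iff_getElem] at hn
        obtain ⟨j, hj, rfl⟩ := hn
        have := hr2 j hj (Nat.zero_le j)
        simp only [decide_eq_true_eq, not_and]
        intro _
        omega
      | succ r' =>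
        have hyb : y ≤ b := hr1 0 (by simp) (Nat.succ_pos r')
        rw [List.drop_zero, show r' + 1 - 0 = r' + 1 from rfl, List.take_succ_cons]
        rw [List.filter_cons_of_pos (by simp [hy, hyb])]
        have := ih 0 r'
          (fun j hj h => absurd h (Nat.not_lt_zero j))
          (fun j hj _ => by
            have := hl2 (j + 1) (by simpa using Nat.succ_lt_succ hj) (Nat.zero_le _)
            simpa using this)
          (fun j hj h => by
            have := hr1 (j + 1) (by simpa using Nat.succ_lt_succ hj) (Nat.succ_lt_succ h)
            simpa using this)
          (fun j hj h => by
            have := hr2 (j + 1) (by simpa using Nat.succ_lt_succ hj) (Nat.succ_le_succ h)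
            simpa using this)
        simpa using this
    | succ l' =>
      have hy : y < a := hl1 0 (by simp) (Nat.succ_pos l')
      rw [List.drop_succ_cons]
      rw [List.filter_cons_of_neg (by simp; omega)]
      rw [show r - (l' + 1) = (r - 1) - l' by omega]
      exact ih l' (r - 1)
        (fun j hj h => by
          have := hl1 (j + 1) (by simpa using Nat.succ_lt_succ hj) (Nat.succ_lt_succ h)
          simpa using this)
        (fun j hj h => by
          have := hl2 (j + 1) (by simpa using Nat.succ_lt_succ hj) (Nat.succ_le_succ h)
          simpa using this)
        (fun j hj h => by
          have := hr1 (j + 1) (by simpa using Nat.succ_lt_succ hj) (by omega)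
          simpa using this)
        (fun j hj h => by
          have := hr2 (j + 1) (by simpa using Nat.succ_lt_succ hj) (by omega)
          simpa using this)

lemma pvBpair (pair : List Int) (threshold : Int) (lst : List Int)
    (hs : List.Pairwise (fun a b => a ≤ b) lst) (acc : List (List Int)) :
    (PySem.List.slice lst (some ((pvWindow lst pair threshold).1 : Int))
        (some ((pvWindow lst pair threshold).2 : Int))).foldl
      (fun acc n => if n ∉ pair then acc ++ [pair ++ [n]] else acc) acc
    = acc ++ pvCanon pair threshold lst := by
  have hwin : PySem.List.slice lst (some ((pvWindow lst pair threshold).1 : Int))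
      (some ((pvWindow lst pair threshold).2 : Int))
      = lst.filter (fun n => decide (∀ v ∈ pair, |n - v| ≤ threshold)) := by
    rcases eq_or_ne pair [] with rfl | hne
    · simp [pvWindow]
    · obtain ⟨mx, hmx⟩ : ∃ mx, PySem.List.max? pair (fun v => v) = some mx := by
        cases h : PySem.List.max? pair (fun v => v) with
        | none => exact absurd ((PySem.List.max?_eq_none_iff pair _).mp h) hne
        | some m => exact ⟨m, rfl⟩
      obtain ⟨mn, hmn⟩ : ∃ mn, PySem.List.min? pair (fun v => v) = some mn := by
        cases h : PySem.List.min? pair (fun v => v) with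
        | none => exact absurd ((PySem.List.min?_eq_none_iff pair _).mp h) hne
        | some m => exact ⟨m, rfl⟩
      have hmxmem := PySem.List.max?_mem hmx
      have hmnmem := PySem.List.min?_mem hmn
      have hmxmax := PySem.List.max?_isMax hmx
      have hmnmin := PySem.List.min?_isMin hmn
      have hwnd : pvWindow lst pair threshold =
          (pvBL lst (mx - threshold) 0 lst.length, pvBR lst (mn + threshold) 0 lst.length) := by
        simp [pvWindow, hne, hmx, hmn]
      rw [hwnd]
      have hbl := pvBL_spec lst (mx - threshold) hs 0 lst.length (le_refl _) (Nat.zero_le _)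
        (fun j hj h => absurd h (Nat.not_lt_zero j)) (fun j hj h => absurd hj (by omega))
      have hbr := pvBR_spec lst (mn + threshold) hs 0 lst.length (le_refl _) (Nat.zero_le _)
        (fun j hj h => absurd h (Nat.not_lt_zero j)) (fun j hj h => absurd hj (by omega))
      rw [PySem.List.slice_natCast]
      rw [pvSeg lst (mx - threshold) (mn + threshold) _ _ hbl.2.2.1 hbl.2.2.2 hbr.2.2.1 hbr.2.2.2]
      apply List.filter_congr
      intro n hn
      have hiff : (mx - threshold ≤ n ∧ n ≤ mn + threshold) ↔ (∀ v ∈ pair, |n - v| ≤ threshold) := by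
        constructor
        · rintro ⟨ha1, ha2⟩ v hv
          have h1 := hmxmax v hv
          have h2 := hmnmin v hv
          simp only at h1 h2
          rw [abs_le]
          omega
        · intro hall
          have h1 := abs_le.mp (hall mx hmxmem)
          have h2 := abs_le.mp (hall mn hmnmem)
          omega
      simp only [decide_eq_decide]
      exact hiff
  rw [hwin]
  have hconv : (fun (acc : List (List Int)) (n : Int) => if n ∉ pair then acc ++ [pair ++ [n]] else acc)
      = fun acc n => if (fun m => decide (m ∉ pair)) n = true then acc ++ [(fun m => pair ++ [m]) n] else acc := by
    funext a n
    by_cases h : n ∈ pair <;> simp [h]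
  rw [hconv, PySem.List.foldl_append_if]
  unfold pvCanon
  rw [List.filter_filter]
  congr 2
  apply List.filter_congr
  intro n hn
  by_cases h1 : (∀ v ∈ pair, |n - v| ≤ threshold) <;> by_cases h2 : n ∈ pair <;> simp [h1, h2]

-- ===== VERDICT (by name: the statement is the Claim_ definition above) =====
theorem list_and_list_of_pairs_spec : Claim_equal_list_and_list_of_pairs := by
  intro il lop thr _
  unfold Spec_list_and_list_of_pairs
  simp only [list_and_list_of_pairs, list_and_list_of_pairs_alt]
  have hs := PySem.List.sorted_pairwise il (fun x => x)
  set lst := PySem.List.sorted il (fun x => x) false with hlst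
  by_cases h : lop = []
  · subst h; simp
  · rw [if_neg (by simpa [List.length_eq_zero_iff] using h)]
    calc lop.foldl (fun acc pair => pvAInner pair thr lst acc) []
        = lop.foldl (fun acc pair => acc ++ pvCanon pair thr lst) [] :=
          pvFoldlCongr _ _ lop [] (fun acc pair _ => pvAInner_eq_canon pair thr lst hs acc)
      _ = lop.foldl (fun acc pair =>
            (PySem.List.slice lst (some ((pvWindow lst pair thr).1 : Int))
                (some ((pvWindow lst pair thr).2 : Int))).foldl
              (fun acc n => if n ∉ pair then acc ++ [pair ++ [n]] else acc) acc) [] :=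
          (pvFoldlCongr _ _ lop [] (fun acc pair _ => pvBpair pair thr lst hs acc)).symm
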